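-- pv_equiv track=rewrite | github.com/bulbulator228/prigramirovanie | maxOlenKonskayaZalupa/vyz/день 19.py | parallelepipeds_with_volume
-- ===== SOURCE A (Python) =====
-- def parallelepipeds_with_volume(v, counted=True):
--     results = []
--     for a in range(1, v + 1):
--         for b in range(1, v + 1):
--             if a * b != 0 and v % (a * b) == 0:
--                 c = v // (a * b)
--                 if counted or (a <= b <= c):
--                     results.append((a, b, c))
--     return results
-- ===== SOURCE B (Python) =====
-- def _divisors(n):
--     # all positive divisors of n (n >= 1), ascending, found in O(sqrt(n))
--     small = []
--     large = []
--     d = 1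
--     while d * d <= n:
--         if n % d == 0:
--             small.append(d)
--             if d * d != n:
--                 large.append(n // d)
--         d += 1
--     return small + large[::-1]
--
--
-- def parallelepipeds_with_volume(v, counted=True):
--     if v <= 0:
--         return []
--     results = []
--     for a in _divisors(v):
--         q = v // a
--         for b in _divisors(q):
--             c = q // b
--             if counted or (a <= b <= c):
--                 results.append((a, b, c))
--     return results
-- ===== Notes on version B (the rewrite author's own statement) =====
-- stated objective: faster
-- what changed: B enumerates the divisors of v by trial division up to sqrt(v) (collecting each divisor d and its cofactor v//d, then joining the two halves), iterates a over those divisors and b over the sqrt-enumerated divisors of q = v//a, instead of A's double scan of the full range 1..v with a v % (a*b) test.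
import Mathlib
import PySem

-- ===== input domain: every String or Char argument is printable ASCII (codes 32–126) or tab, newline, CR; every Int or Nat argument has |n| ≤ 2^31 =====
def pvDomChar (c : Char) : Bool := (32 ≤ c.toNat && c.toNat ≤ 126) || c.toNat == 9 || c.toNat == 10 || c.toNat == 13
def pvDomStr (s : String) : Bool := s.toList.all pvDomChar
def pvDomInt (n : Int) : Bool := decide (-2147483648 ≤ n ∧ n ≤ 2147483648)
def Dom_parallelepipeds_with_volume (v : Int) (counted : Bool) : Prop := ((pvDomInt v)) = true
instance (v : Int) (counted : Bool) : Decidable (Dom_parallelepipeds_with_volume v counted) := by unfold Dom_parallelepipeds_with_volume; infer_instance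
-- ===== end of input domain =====

-- B replaces A's O(v^2) double range scan by sqrt-trial-division divisor enumeration:
-- a runs over the divisors of v, b over the divisors of v//a (objective: faster, asymptotic).

-- ===== PORT A =====
def parallelepipeds_with_volume (v : Int) (counted : Bool) : List (List Int) :=
  (PySem.List.pyRange 1 (v + 1) 1).foldl (fun results a =>
    (PySem.List.pyRange 1 (v + 1) 1).foldl (fun results b =>
      if a * b ≠ 0 ∧ PySem.Int.mod v (a * b) = 0 then
        let c := PySem.Int.floordiv v (a * b)
        if counted || decide (a ≤ b ∧ b ≤ c) then results ++ [[a, b, c]] else results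
      else results) results) []

-- ===== PORT B =====
-- Source B's `_divisors` while-loop: d counts up while d*d <= n, collecting d into `small`
-- and n//d into `large`; the result is small ++ large[::-1].
-- fuel = an upper bound on the remaining iterations (the loop exits once d*d > n,
-- so n.toNat iterations always suffice; pvDivAux_spec proves the fuel is never exhausted)
def pvDivAux (n : Int) (fuel : Nat) (d : Int) (small large : List Int) : List Int :=
  match fuel with
  | 0 => small ++ large.reverse
  | fuel + 1 =>
    if d * d ≤ n then
      if PySem.Int.mod n d = 0 then
        if d * d ≠ n then
          pvDivAux n fuel (d + 1) (small ++ [d]) (large ++ [PySem.Int.floordiv n d])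
        else pvDivAux n fuel (d + 1) (small ++ [d]) large
      else pvDivAux n fuel (d + 1) small large
    else small ++ large.reverse

def pvDivisors (n : Int) : List Int := pvDivAux n n.toNat 1 [] []

def parallelepipeds_with_volume_alt (v : Int) (counted : Bool) : List (List Int) :=
  if v ≤ 0 then []
  else
    (pvDivisors v).foldl (fun results a =>
      let q := PySem.Int.floordiv v a
      (pvDivisors q).foldl (fun results b =>
        let c := PySem.Int.floordiv q b
        if counted || decide (a ≤ b ∧ b ≤ c) then results ++ [[a, b, c]] else results) results) []

-- ===== PRECONDITION & SPEC =====
def Spec_parallelepipeds_with_volume (v : Int) (counted : Bool) (out : List (List Int)) : Prop := out = parallelepipeds_with_volume_alt v counted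
instance (v : Int) (counted : Bool) (out : List (List Int)) : Decidable (Spec_parallelepipeds_with_volume v counted out) := by unfold Spec_parallelepipeds_with_volume; infer_instance

-- ===== CLAIM (what is proved, stated in full; the proofs are below) =====
def Claim_equal_parallelepipeds_with_volume : Prop := ∀ (v : Int) (counted : Bool), Dom_parallelepipeds_with_volume v counted → Spec_parallelepipeds_with_volume v counted (parallelepipeds_with_volume v counted)

-- ===== LEMMAS AND PROOFS =====

-- A's inner-loop body as a (possibly empty) contribution list
def pvGA (v : Int) (counted : Bool) (a b : Int) : List (List Int) :=
  if a * b ≠ 0 ∧ PySem.Int.mod v (a * b) = 0 then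
    if counted || decide (a ≤ b ∧ b ≤ PySem.Int.floordiv v (a * b)) then
      [[a, b, PySem.Int.floordiv v (a * b)]] else []
  else []

-- B's inner-loop body as a contribution list
def pvGB (v : Int) (counted : Bool) (a b : Int) : List (List Int) :=
  if counted || decide (a ≤ b ∧ b ≤ PySem.Int.floordiv (PySem.Int.floordiv v a) b) then
    [[a, b, PySem.Int.floordiv (PySem.Int.floordiv v a) b]] else []

theorem pv_flatMap_filter {α β : Type} (l : List α) (p : α → Bool) (f : α → List β)
    (h : ∀ x ∈ l, p x = false → f x = []) :
    l.flatMap f = (l.filter p).flatMap f := by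
  induction l with
  | nil => rfl
  | cons x t ih =>
    simp only [List.flatMap_cons, List.filter_cons]
    rcases hp : p x with _ | _
    · simp [h x (List.mem_cons_self) hp, ih (fun y hy => h y (List.mem_cons_of_mem x hy))]
    · simp [List.flatMap_cons, ih (fun y hy => h y (List.mem_cons_of_mem x hy))]

theorem pv_flatMap_congr {α β : Type} (l : List α) (f g : α → List β)
    (h : ∀ x ∈ l, f x = g x) : l.flatMap f = l.flatMap g := by
  induction l with
  | nil => rfl
  | cons x t ih =>
    simp only [List.flatMap_cons]
    rw [h x List.mem_cons_self, ih (fun y hy => h y (List.mem_cons_of_mem x hy))]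

theorem pvA_eq (v : Int) (counted : Bool) :
    parallelepipeds_with_volume v counted =
      (PySem.List.pyRange 1 (v + 1) 1).flatMap (fun a =>
        (PySem.List.pyRange 1 (v + 1) 1).flatMap (pvGA v counted a)) := by
  unfold parallelepipeds_with_volume
  have hin : ∀ (a : Int) (acc : List (List Int)),
      (PySem.List.pyRange 1 (v + 1) 1).foldl (fun results b =>
        if a * b ≠ 0 ∧ PySem.Int.mod v (a * b) = 0 then
          let c := PySem.Int.floordiv v (a * b)
          if counted || decide (a ≤ b ∧ b ≤ c) then results ++ [[a, b, c]] else results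
        else results) acc
      = acc ++ (PySem.List.pyRange 1 (v + 1) 1).flatMap (pvGA v counted a) := by
    intro a acc
    calc _ = (PySem.List.pyRange 1 (v + 1) 1).foldl
          (fun (results : List (List Int)) b => results ++ pvGA v counted a b) acc :=
        PySem.List.foldl_congr_mem _ _ _ _
          (by intro acc' b _; unfold pvGA; split_ifs <;> simp_all)
      _ = _ := PySem.List.foldl_append_eq_flatMap _ _ _
  calc _ = (PySem.List.pyRange 1 (v + 1) 1).foldl
        (fun (results : List (List Int)) a =>
          results ++ (PySem.List.pyRange 1 (v + 1) 1).flatMap (pvGA v counted a)) [] :=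
      PySem.List.foldl_congr_mem _ _ _ _ (by intro acc a _; exact hin a acc)
    _ = _ := by
      rw [PySem.List.foldl_append_eq_flatMap]; simp

theorem pvB_eq (v : Int) (counted : Bool) (hv : ¬ v ≤ 0) :
    parallelepipeds_with_volume_alt v counted =
      (pvDivisors v).flatMap (fun a =>
        (pvDivisors (PySem.Int.floordiv v a)).flatMap (pvGB v counted a)) := by
  unfold parallelepipeds_with_volume_alt
  rw [if_neg hv]
  have hin : ∀ (a : Int) (acc : List (List Int)),
      (pvDivisors (PySem.Int.floordiv v a)).foldl (fun results b =>
        if counted || decide (a ≤ b ∧ b ≤ PySem.Int.floordiv (PySem.Int.floordiv v a) b) then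
          results ++ [[a, b, PySem.Int.floordiv (PySem.Int.floordiv v a) b]] else results) acc
      = acc ++ (pvDivisors (PySem.Int.floordiv v a)).flatMap (pvGB v counted a) := by
    intro a acc
    calc _ = (pvDivisors (PySem.Int.floordiv v a)).foldl
          (fun (results : List (List Int)) b => results ++ pvGB v counted a b) acc :=
        PySem.List.foldl_congr_mem _ _ _ _
          (by intro acc' b _; unfold pvGB; split_ifs <;> simp_all)
      _ = _ := PySem.List.foldl_append_eq_flatMap _ _ _
  calc _ = (pvDivisors v).foldl
        (fun (results : List (List Int)) a =>
          results ++ (pvDivisors (PySem.Int.floordiv v a)).flatMap (pvGB v counted a)) [] :=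
      PySem.List.foldl_congr_mem _ _ _ _ (by intro acc a _; exact hin a acc)
    _ = _ := by
      rw [PySem.List.foldl_append_eq_flatMap]; simp

theorem pv_le_of_sq_le (d n : Int) (h : d * d ≤ n) : d ≤ n := by
  rcases (by omega : d ≤ 0 ∨ 0 < d) with hd | hd
  · have := mul_self_nonneg d; omega
  · have : d ≤ d * d := le_mul_of_one_le_left (by omega) (by omega)
    omega

-- at loop exit small ++ large.reverse is exactly the ascending divisor list of n
theorem pvDivExit (n d : Int) (small large : List Int) (hn : 1 ≤ n) (hd : 1 ≤ d)
    (hstop : ¬ d * d ≤ n)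
    (Hs : ∀ x, x ∈ small ↔ (1 ≤ x ∧ x < d ∧ x ∣ n))
    (Hssq : ∀ x ∈ small, x * x ≤ n)
    (Hsp : small.Pairwise (· < ·))
    (Hl : ∀ x, x ∈ large ↔ (1 ≤ x ∧ x ∣ n ∧ n < x * x ∧ n / x < d))
    (Hlp : large.Pairwise (· > ·)) :
    small ++ large.reverse =
      (PySem.List.pyRange 1 (n + 1) 1).filter (fun e => PySem.Int.mod n e == 0) := by
  have hLp : (small ++ large.reverse).Pairwise (· < ·) := by
    rw [List.pairwise_append]
    refine ⟨Hsp, by rw [List.pairwise_reverse]; exact Hlp, ?_⟩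
    intro x hx y hy
    rw [List.mem_reverse] at hy
    obtain ⟨hx1, -, -⟩ := (Hs x).mp hx
    obtain ⟨hy1, -, hy3, -⟩ := (Hl y).mp hy
    have hxsq := Hssq x hx
    by_contra hle
    have : y * y ≤ x * x :=
      mul_le_mul (by omega) (by omega) (by omega) (by omega)
    linarith
  have hTp : ((PySem.List.pyRange 1 (n + 1) 1).filter
      (fun e => PySem.Int.mod n e == 0)).Pairwise (· < ·) :=
    (PySem.List.pairwise_lt_pyRange_one 1 (n + 1)).filter _
  have hmem : ∀ x, x ∈ small ++ large.reverse ↔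
      x ∈ (PySem.List.pyRange 1 (n + 1) 1).filter (fun e => PySem.Int.mod n e == 0) := by
    intro x
    rw [List.mem_append, List.mem_reverse, List.mem_filter, PySem.List.mem_pyRange_one, Hs, Hl,
      beq_iff_eq, PySem.Int.mod_eq_zero_iff_dvd]
    constructor
    · rintro (⟨h1, h2, h3⟩ | ⟨h1, h2, h3, h4⟩)
      · exact ⟨⟨h1, by have := Int.le_of_dvd (by omega) h3; omega⟩, h3⟩
      · exact ⟨⟨h1, by have := Int.le_of_dvd (by omega) h2; omega⟩, h2⟩
    · rintro ⟨⟨h1, h2⟩, h3⟩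
      by_cases hsq : x * x ≤ n
      · refine Or.inl ⟨h1, ?_, h3⟩
        by_contra hge
        have hdd : d * d ≤ x * x :=
          mul_le_mul (by omega) (by omega) (by omega) (by omega)
        have hst : n < d * d := lt_of_not_ge hstop
        linarith
      · rw [not_le] at hsq
        refine Or.inr ⟨h1, h3, hsq, ?_⟩
        have hx : n / x * x = n := Int.ediv_mul_cancel h3
        have he1 : 1 ≤ n / x := (Int.le_ediv_iff_mul_le (by omega)).mpr
          (by have := Int.le_of_dvd (by omega : (0:Int) < n) h3; omega)
        have hex : n / x < x :=
          lt_of_mul_lt_mul_right (show n / x * x < x * x by linarith) (by omega : (0:Int) ≤ x)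
        have hee : n / x * (n / x) < n := by
          have := mul_lt_mul_of_pos_left hex (by omega : (0:Int) < n / x)
          linarith
        by_contra hge
        have : d * d ≤ n / x * (n / x) :=
          mul_le_mul (by omega) (by omega) (by omega) (by omega)
        have hst : n < d * d := lt_of_not_ge hstop
        linarith
  exact PySem.List.eq_of_perm_of_pairwise_le_of_injective (fun x => x) (fun _ _ h => h)
    ((List.perm_ext_iff_of_nodup (hLp.imp ne_of_lt) (hTp.imp ne_of_lt)).mpr hmem)
    (hLp.imp le_of_lt) (hTp.imp le_of_lt)

-- the invariant of Source B's while-loop, by induction on the remaining iterations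
theorem pvDivAux_spec (n : Int) (hn : 1 ≤ n) :
    ∀ (k : Nat) (d : Int) (small large : List Int), (n + 1 - d).toNat ≤ k → 1 ≤ d →
    (∀ x, x ∈ small ↔ (1 ≤ x ∧ x < d ∧ x ∣ n)) →
    (∀ x ∈ small, x * x ≤ n) →
    small.Pairwise (· < ·) →
    (∀ x, x ∈ large ↔ (1 ≤ x ∧ x ∣ n ∧ n < x * x ∧ n / x < d)) →
    large.Pairwise (· > ·) →
    pvDivAux n k d small large =
      (PySem.List.pyRange 1 (n + 1) 1).filter (fun e => PySem.Int.mod n e == 0) := by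
  intro k
  induction k with
  | zero =>
    intro d small large hk hd Hs Hssq Hsp Hl Hlp
    have hstop : ¬ d * d ≤ n := by
      intro hg
      have h1 : d ≤ n := pv_le_of_sq_le d n hg
      omega
    exact pvDivExit n d small large hn hd hstop Hs Hssq Hsp Hl Hlp
  | succ k ih =>
    intro d small large hk hd Hs Hssq Hsp Hl Hlp
    rw [pvDivAux]
    by_cases hg : d * d ≤ n
    · rw [if_pos hg]
      have hdn : d ≤ n := pv_le_of_sq_le d n hg
      have hk' : (n + 1 - (d + 1)).toNat ≤ k := by omega
      by_cases hdvd : PySem.Int.mod n d = 0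
      · rw [if_pos hdvd]
        have hdvd' : d ∣ n := (PySem.Int.mod_eq_zero_iff_dvd n d).mp hdvd
        have hfd : PySem.Int.floordiv n d = n / d := PySem.Int.floordiv_eq_ediv_of_pos (by omega)
        have hmd : n / d * d = n := Int.ediv_mul_cancel hdvd'
        have hm1 : 1 ≤ n / d := (Int.le_ediv_iff_mul_le (by omega)).mpr (by omega)
        have Hs' : ∀ x, x ∈ small ++ [d] ↔ (1 ≤ x ∧ x < d + 1 ∧ x ∣ n) := by
          intro x
          simp only [List.mem_append, List.mem_singleton, Hs]
          constructor
          · rintro (⟨h1, h2, h3⟩ | rfl)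
            · exact ⟨h1, by omega, h3⟩
            · exact ⟨hd, by omega, hdvd'⟩
          · rintro ⟨h1, h2, h3⟩
            rcases (by omega : x < d ∨ x = d) with h | h
            · exact Or.inl ⟨h1, h, h3⟩
            · exact Or.inr h
        have Hssq' : ∀ x ∈ small ++ [d], x * x ≤ n := by
          intro x hx
          rcases List.mem_append.mp hx with h | h
          · exact Hssq x h
          · rw [List.mem_singleton] at h; subst h; exact hg
        have Hsp' : (small ++ [d]).Pairwise (· < ·) := by
          rw [List.pairwise_append]
          refine ⟨Hsp, List.pairwise_singleton _ _, ?_⟩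
          intro x hx y hy
          rw [List.mem_singleton] at hy; subst hy
          exact ((Hs x).mp hx).2.1
        by_cases hne : d * d ≠ n
        · rw [if_pos hne, hfd]
          have hdm : d < n / d := by
            have h1 : d * d < n := lt_of_le_of_ne hg hne
            exact lt_of_mul_lt_mul_right (by linarith) (by omega : (0:Int) ≤ d)
          refine ih (d + 1) (small ++ [d]) (large ++ [n / d]) hk' (by omega) Hs' Hssq' Hsp' ?_ ?_
          · intro x
            simp only [List.mem_append, List.mem_singleton, Hl]
            constructor
            · rintro (⟨h1, h2, h3, h4⟩ | rfl)
              · exact ⟨h1, h2, h3, by omega⟩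
              · refine ⟨hm1, ⟨d, hmd.symm⟩, by
                  have := mul_lt_mul_of_pos_left hdm (by omega : (0:Int) < n / d)
                  linarith, ?_⟩
                have : n / d * d / (n / d) = d := Int.mul_ediv_cancel_left d (by omega)
                rw [hmd] at this
                omega
            · rintro ⟨h1, h2, h3, h4⟩
              have hx : n / x * x = n := Int.ediv_mul_cancel h2
              rcases (by omega : n / x < d ∨ n / x = d) with h | h
              · exact Or.inl ⟨h1, h2, h3, h⟩
              · refine Or.inr ?_
                rw [h] at hx
                exact mul_left_cancel₀ (by omega : d ≠ 0) (by linear_combination hx - hmd)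
          · rw [List.pairwise_append]
            refine ⟨Hlp, List.pairwise_singleton _ _, ?_⟩
            intro y hy z hz
            rw [List.mem_singleton] at hz; subst hz
            obtain ⟨h1, h2, h3, h4⟩ := (Hl y).mp hy
            have hy' : n / y * y = n := Int.ediv_mul_cancel h2
            by_contra hle
            have hA : n / y * y ≤ (d - 1) * y :=
              mul_le_mul_of_nonneg_right (by omega) (by omega)
            have hB : d * y ≤ d * (n / d) :=
              mul_le_mul_of_nonneg_left (by omega) (by omega)
            have hC : (d - 1) * y = d * y - y := by ring
            have hD : d * (n / d) = n / d * d := by ring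
            linarith
        · rw [if_neg hne]
          rw [not_not] at hne
          refine ih (d + 1) (small ++ [d]) large hk' (by omega) Hs' Hssq' Hsp' ?_ Hlp
          intro x
          rw [Hl]
          constructor
          · rintro ⟨h1, h2, h3, h4⟩
            exact ⟨h1, h2, h3, by omega⟩
          · rintro ⟨h1, h2, h3, h4⟩
            refine ⟨h1, h2, h3, ?_⟩
            have hx : n / x * x = n := Int.ediv_mul_cancel h2
            rcases (by omega : n / x < d ∨ n / x = d) with h | h
            · exact h
            · rw [h] at hx
              have hxd : x = d := mul_left_cancel₀ (by omega : d ≠ 0)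
                (by linear_combination hx - hne)
              rw [hxd] at h3
              linarith
      · rw [if_neg hdvd]
        refine ih (d + 1) small large hk' (by omega) ?_ Hssq Hsp ?_ Hlp
        · intro x
          rw [Hs]
          constructor
          · rintro ⟨h1, h2, h3⟩
            exact ⟨h1, by omega, h3⟩
          · rintro ⟨h1, h2, h3⟩
            refine ⟨h1, ?_, h3⟩
            rcases (by omega : x < d ∨ x = d) with h | h
            · exact h
            · subst h
              exact absurd ((PySem.Int.mod_eq_zero_iff_dvd n x).mpr h3) hdvd
        · intro x
          rw [Hl]
          constructor
          · rintro ⟨h1, h2, h3, h4⟩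
            exact ⟨h1, h2, h3, by omega⟩
          · rintro ⟨h1, h2, h3, h4⟩
            refine ⟨h1, h2, h3, ?_⟩
            have hx : n / x * x = n := Int.ediv_mul_cancel h2
            rcases (by omega : n / x < d ∨ n / x = d) with h | h
            · exact h
            · rw [h] at hx
              exact absurd ((PySem.Int.mod_eq_zero_iff_dvd n d).mpr ⟨x, hx.symm⟩) hdvd
    · rw [if_neg hg]
      exact pvDivExit n d small large hn hd hg Hs Hssq Hsp Hl Hlp

theorem pvDivisors_eq (n : Int) (hn : 1 ≤ n) :
    pvDivisors n = (PySem.List.pyRange 1 (n + 1) 1).filter (fun e => PySem.Int.mod n e == 0) := by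
  refine pvDivAux_spec n hn n.toNat 1 [] [] (by omega) le_rfl ?_ (by simp) (by simp) ?_ (by simp)
  · intro x; simp; omega
  · intro x
    simp only [List.not_mem_nil, false_iff, not_and]
    intro h1 h2 h3
    have := Int.le_of_dvd (by omega) h2
    have : 1 ≤ n / x := (Int.le_ediv_iff_mul_le (by omega)).mpr (by omega)
    omega

-- if a does not divide v, A's inner loop contributes nothing
theorem pvGA_nil_of_not_dvd (v : Int) (counted : Bool) (a b : Int)
    (h : PySem.Int.mod v a ≠ 0) : pvGA v counted a b = [] := by
  unfold pvGA
  split_ifs with h1 h2 <;> try rfl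
  all_goals exact absurd ((PySem.Int.mod_eq_zero_iff_dvd v a).mpr
    (dvd_trans (dvd_mul_right a b) ((PySem.Int.mod_eq_zero_iff_dvd v (a * b)).mp h1.2))) h

-- for a divisor a of v, A's inner loop contributes nothing unless b divides v / a
theorem pvGA_nil_of_not_dvd_q (v : Int) (counted : Bool) (a b : Int)
    (ha1 : 1 ≤ a) (ha : a ∣ v) (h : ¬ b ∣ v / a) : pvGA v counted a b = [] := by
  unfold pvGA
  split_ifs with h1 h2 <;> try rfl
  all_goals
    exfalso
    apply h
    have hva : v / a * a = v := Int.ediv_mul_cancel ha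
    have habv : a * b ∣ a * (v / a) := by
      rw [mul_comm a (v / a), hva]
      exact (PySem.Int.mod_eq_zero_iff_dvd v (a * b)).mp h1.2
    exact (mul_dvd_mul_iff_left (by omega : a ≠ 0)).mp habv

-- pointwise agreement of the two loop bodies on divisor pairs
theorem pvGA_eq_pvGB (v : Int) (counted : Bool) (a b : Int)
    (ha1 : 1 ≤ a) (ha : a ∣ v) (hb1 : 1 ≤ b) (hb : b ∣ v / a) :
    pvGA v counted a b = pvGB v counted a b := by
  have hfa : PySem.Int.floordiv v a = v / a := PySem.Int.floordiv_eq_ediv_of_pos (by omega)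
  have hva : v / a * a = v := Int.ediv_mul_cancel ha
  have hguard : a * b ≠ 0 ∧ PySem.Int.mod v (a * b) = 0 := by
    refine ⟨ne_of_gt (mul_pos (by omega) (by omega)), (PySem.Int.mod_eq_zero_iff_dvd v (a * b)).mpr ?_⟩
    have : a * b ∣ a * (v / a) := mul_dvd_mul_left a hb
    rwa [mul_comm a (v / a), hva] at this
  have hc : PySem.Int.floordiv v (a * b) = PySem.Int.floordiv (v / a) b := by
    rw [PySem.Int.floordiv_eq_ediv_of_pos (mul_pos (by omega) (by omega) : (0:Int) < a * b),
      PySem.Int.floordiv_eq_ediv_of_pos (by omega : (0:Int) < b)]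
    calc v / (a * b) = a * (v / a) / (a * b) := by rw [mul_comm a (v / a), hva]
      _ = v / a / b := Int.mul_ediv_mul_of_pos (v / a) b (by omega)
  unfold pvGA pvGB
  rw [if_pos hguard, hfa, hc]

-- entries of the range above q never divide q, so the filtered range shrinks to 1..q
theorem pv_filter_shrink (v q : Int) (hq1 : 1 ≤ q) (hqv : q ≤ v) :
    (PySem.List.pyRange 1 (v + 1) 1).filter (fun b => PySem.Int.mod q b == 0)
      = (PySem.List.pyRange 1 (q + 1) 1).filter (fun b => PySem.Int.mod q b == 0) := by
  rw [PySem.List.pyRange_one_append 1 (q + 1) (v + 1) (by omega) (by omega), List.filter_append]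
  have hnil : (PySem.List.pyRange (q + 1) (v + 1) 1).filter
      (fun b => PySem.Int.mod q b == 0) = [] := by
    rw [List.filter_eq_nil_iff]
    intro b hb
    obtain ⟨hb1, hb2⟩ := (PySem.List.mem_pyRange_one).mp hb
    simp only [beq_iff_eq, PySem.Int.mod_eq_zero_iff_dvd]
    intro hdvd
    have := Int.le_of_dvd (by omega) hdvd
    omega
  rw [hnil, List.append_nil]

-- ===== VERDICT (by name: the statement is the Claim_ definition above) =====
theorem parallelepipeds_with_volume_spec : Claim_equal_parallelepipeds_with_volume := by
  intro v counted _
  unfold Spec_parallelepipeds_with_volume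
  by_cases hv : v ≤ 0
  · unfold parallelepipeds_with_volume parallelepipeds_with_volume_alt
    rw [PySem.List.pyRange_one_eq_nil (by omega), if_pos hv]
    rfl
  · rw [pvA_eq, pvB_eq v counted hv, pvDivisors_eq v (by omega)]
    rw [pv_flatMap_filter _ (fun d => PySem.Int.mod v d == 0) _
      (by
        intro a _ hp
        have h : PySem.Int.mod v a ≠ 0 := by simpa using hp
        simp [pv_flatMap_congr _ _ (fun _ => [])
          (fun b _ => pvGA_nil_of_not_dvd v counted a b h)])]
    refine pv_flatMap_congr _ _ _ ?_
    intro a ha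
    obtain ⟨haR, hav⟩ := List.mem_filter.mp ha
    have ha1 : 1 ≤ a := ((PySem.List.mem_pyRange_one).mp haR).1
    have hadvd : a ∣ v := (PySem.Int.mod_eq_zero_iff_dvd v a).mp (by simpa using hav)
    have hfa : PySem.Int.floordiv v a = v / a := PySem.Int.floordiv_eq_ediv_of_pos (by omega)
    have hqdvd : v / a ∣ v := ⟨a, (Int.ediv_mul_cancel hadvd).symm⟩
    have hqv : v / a ≤ v := Int.le_of_dvd (by omega) hqdvd
    have hq1 : 1 ≤ v / a := (Int.le_ediv_iff_mul_le (by omega)).mpr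
      (by have := Int.le_of_dvd (by omega : (0:Int) < v) hadvd; omega)
    rw [pv_flatMap_filter _ (fun b => PySem.Int.mod (v / a) b == 0) _
      (by
        intro b _ hp
        have h : ¬ b ∣ v / a := by
          simpa [PySem.Int.mod_eq_zero_iff_dvd] using hp
        exact pvGA_nil_of_not_dvd_q v counted a b ha1 hadvd h)]
    rw [pv_filter_shrink v (v / a) hq1 hqv, hfa, pvDivisors_eq (v / a) hq1]
    refine pv_flatMap_congr _ _ _ ?_
    intro b hb
    obtain ⟨hbR, hbq⟩ := List.mem_filter.mp hb
    have hb1 : 1 ≤ b := ((PySem.List.mem_pyRange_one).mp hbR).1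
    have hbdvd : b ∣ v / a := (PySem.Int.mod_eq_zero_iff_dvd (v / a) b).mp (by simpa using hbq)
    exact pvGA_eq_pvGB v counted a b ha1 hadvd hb1 hbdvd
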